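-- pv_equiv track=rewrite | github.com/hgbrian/foldism | backends/boltz.py | _parse_paired_hits
-- ===== SOURCE A (Python) =====
-- def _parse_paired_hits(content: str, num_chains: int) -> dict[int, list[str]]:
--     """Parse paired A3M into per-chain hit sequence lists, skipping query."""
--     chains: dict[int, list[str]] = {i: [] for i in range(num_chains)}
--     current_chain: int | None = None
--     current_lines: list[str] = []
--
--     for line in content.splitlines():
--         line = line.strip()
--         if not line or line.startswith("#"):
--             continue
--         if line.startswith(">"):
--             if current_chain is not None and current_lines:
--                 seq = "".join(current_lines)
--                 chains[current_chain].append("".join(c for c in seq if not c.islower()))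
--             current_lines = []
--             first_field = line[1:].strip().split("\t")[0].strip()
--             try:
--                 chain_id = int(first_field)
--                 if 101 <= chain_id < 101 + num_chains:
--                     current_chain = chain_id - 101
--             except ValueError:
--                 pass
--         else:
--             if current_chain is not None:
--                 current_lines.append(line)
--
--     if current_chain is not None and current_lines:
--         seq = "".join(current_lines)
--         chains[current_chain].append("".join(c for c in seq if not c.islower()))
--
--     # Skip first entry per chain (query)
--     for idx in chains:
--         if chains[idx]:
--             chains[idx] = chains[idx][1:]
--
--     return chains
-- ===== SOURCE B (Python) =====
-- def _parse_paired_hits(content: str, num_chains: int) -> dict[int, list[str]]: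
--     """Parse paired A3M into per-chain hit sequence lists, skipping query.
--
--     Two-pass: group the cleaned lines into (header, sequence-lines) records,
--     then fold the records with a single current_chain variable."""
--     lines = [ln.strip() for ln in content.splitlines()]
--     lines = [ln for ln in lines if ln and not ln.startswith("#")]
--
--     records: list[tuple[str, list[str]]] = []
--     for ln in lines:
--         if ln.startswith(">"):
--             records.append((ln, []))
--         elif records:
--             records[-1][1].append(ln)
--
--     chains: dict[int, list[str]] = {i: [] for i in range(num_chains)}
--     current_chain: int | None = None
--     for header, seq_lines in records:
--         first_field = header[1:].strip().split("\t")[0].strip()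
--         try:
--             chain_id = int(first_field)
--             if 101 <= chain_id < 101 + num_chains:
--                 current_chain = chain_id - 101
--         except ValueError:
--             pass
--         if current_chain is not None and seq_lines:
--             seq = "".join(seq_lines)
--             chains[current_chain].append("".join(c for c in seq if not c.islower()))
--
--     return {i: seqs[1:] for i, seqs in chains.items()}
-- ===== Notes on version B (the rewrite author's own statement) =====
-- stated objective: alternative
-- what changed: A accumulates sequence lines in a streaming loop with three pieces of mutable state and flushes them at each '>' header and after the loop; B instead first groups the cleaned lines into explicit (header, sequence-lines) records and then folds over the records with a single current_chain variable, finally mapping seqs[1:] over the dict.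
import Mathlib
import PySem

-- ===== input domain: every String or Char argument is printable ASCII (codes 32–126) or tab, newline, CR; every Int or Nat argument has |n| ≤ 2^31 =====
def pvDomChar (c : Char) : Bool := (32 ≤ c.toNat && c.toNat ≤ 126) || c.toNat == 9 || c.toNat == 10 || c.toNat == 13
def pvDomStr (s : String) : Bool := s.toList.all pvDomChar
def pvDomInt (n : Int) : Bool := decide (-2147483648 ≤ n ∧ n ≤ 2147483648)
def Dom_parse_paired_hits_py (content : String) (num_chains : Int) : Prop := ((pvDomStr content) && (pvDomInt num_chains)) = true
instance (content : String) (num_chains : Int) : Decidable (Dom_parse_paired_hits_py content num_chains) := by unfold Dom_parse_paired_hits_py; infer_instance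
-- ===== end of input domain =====

-- B replaces A's single streaming loop (flush-at-next-header with three pieces of loop state) by an
-- explicit grouping pass into (header, sequence-lines) records followed by a per-record fold; same
-- results, a clearer decomposition (objective: alternative).


-- Helpers shared by both ports: these are the very Python expressions that appear verbatim in both
-- A and B (header-field parse with its range check, and the join-then-drop-lowercase of a record).
-- `first_field = line[1:].strip().split("\t")[0].strip()`; split("\t") never returns an empty list,
-- so the Python `[0]` is exactly `headD`.
def pvFirstField (line : String) : String :=
  String.ofList (PySem.Chars.strip
    ((PySem.Chars.splitOn (PySem.Str.strip (PySem.Str.slice line (some 1) none)).toList ['\t']).headD []))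

-- `try: chain_id = int(first_field); if 101 <= chain_id < 101+num_chains: current_chain = chain_id-101
--  except ValueError: pass`   (otherwise current_chain is left unchanged)
def pvUpdChain (num_chains : Int) (cur : Option Int) (line : String) : Option Int :=
  match PySem.Int.ofStr? (pvFirstField line) with
  | some cid => if 101 ≤ cid ∧ cid < 101 + num_chains then some (cid - 101) else cur
  | none => cur

-- `"".join(c for c in "".join(lines) if not c.islower())`
def pvJoinUpper (ls : List String) : String :=
  String.ofList ((PySem.Str.join "" ls).toList.filter (fun c => !PySem.Chars.islower c))

-- ===== PORT A =====
-- A streams over the raw lines keeping (chains, current_chain, current_lines), flushing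
-- current_lines into chains[current_chain] at each '>' header and once more after the loop,
-- then drops the first entry per chain.  The flush block that Python A repeats twice:
-- `if current_chain is not None and current_lines: chains[current_chain].append("".join(...))`.
-- chains[current_chain].append(x) is ported as modify (the key 0 ≤ current_chain < num_chains
-- is always present, so Python's KeyError is unreachable).
def pvFlushW (d : PySem.Dict Int (List String)) (cur : Option Int) (s : List String) :
    PySem.Dict Int (List String) :=
  match cur with
  | some cc => if s ≠ [] then d.modify cc [] (fun v => v ++ [pvJoinUpper s]) else d
  | none => d

-- the body of A's `for line in content.splitlines():` loop
def pvLineStepA (num_chains : Int) (st : PySem.Dict Int (List String) × Option Int × List String)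
    (raw : String) : PySem.Dict Int (List String) × Option Int × List String :=
  let line := PySem.Str.strip raw
  if line = "" ∨ PySem.Str.startswith line "#" = true then st
  else if PySem.Str.startswith line ">" then
    (pvFlushW st.1 st.2.1 st.2.2, pvUpdChain num_chains st.2.1 line, ([] : List String))
  else
    match st.2.1 with
    | some _ => (st.1, st.2.1, st.2.2 ++ [line])
    | none => st

-- the body of A's final `for idx in chains: if chains[idx]: chains[idx] = chains[idx][1:]`
def pvDropStep (d : PySem.Dict Int (List String)) (idx : Int) : PySem.Dict Int (List String) :=
  if d.getD idx [] ≠ [] then d.insert idx (PySem.List.slice (d.getD idx []) (some 1) none) else d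

def parse_paired_hits_py (content : String) (num_chains : Int) : List (Int × List String) :=
  let chains0 : PySem.Dict Int (List String) :=   -- {i: [] for i in range(num_chains)}
    (PySem.List.pyRange 0 num_chains 1).foldl (fun d i => d.insert i []) PySem.Dict.empty
  let st := (PySem.Str.splitlines content).foldl (pvLineStepA num_chains) (chains0, none, [])
  let chains := pvFlushW st.1 st.2.1 st.2.2      -- the trailing flush after the loop
  (chains.keys.foldl pvDropStep chains).items

-- ===== PORT B =====
-- B first groups the cleaned lines into (header, sequence-lines) records, then folds over the
-- records with a single current_chain, and finally maps seqs[1:] over the dict items.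

-- the body of B's grouping loop:
-- `if ln.startswith(">"): records.append((ln, [])) elif records: records[-1][1].append(ln)`
def pvStepG (recs : List (String × List String)) (ln : String) : List (String × List String) :=
  if PySem.Str.startswith ln ">" then recs ++ [(ln, [])]
  else
    match recs.getLast? with
    | some r => recs.dropLast ++ [(r.1, r.2 ++ [ln])]
    | none => recs

-- the body of B's per-record loop: update current_chain from the header, then append the
-- record's filtered sequence to chains[current_chain] when it is set and the record has lines
def pvStepB (num_chains : Int) (st : PySem.Dict Int (List String) × Option Int)
    (rec : String × List String) : PySem.Dict Int (List String) × Option Int :=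
  let cur := pvUpdChain num_chains st.2 rec.1
  match cur with
  | some cc => if rec.2 ≠ [] then (st.1.modify cc [] (fun v => v ++ [pvJoinUpper rec.2]), cur) else (st.1, cur)
  | none => (st.1, cur)

def parse_paired_hits_py_alt (content : String) (num_chains : Int) : List (Int × List String) :=
  let lines := ((PySem.Str.splitlines content).map PySem.Str.strip).filter
      (fun l => !(l == "") && !PySem.Str.startswith l "#")
  let records := lines.foldl pvStepG []
  let chains0 : PySem.Dict Int (List String) :=   -- {i: [] for i in range(num_chains)}
    (PySem.List.pyRange 0 num_chains 1).foldl (fun d i => d.insert i []) PySem.Dict.empty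
  let st := records.foldl (pvStepB num_chains) (chains0, none)
  st.1.items.map (fun p => (p.1, PySem.List.slice p.2 (some 1) none))   -- {i: seqs[1:] …}

-- ===== PRECONDITION & SPEC =====
def Spec_parse_paired_hits_py (content : String) (num_chains : Int) (out : List (Int × List String)) : Prop := out = parse_paired_hits_py_alt content num_chains
instance (content : String) (num_chains : Int) (out : List (Int × List String)) : Decidable (Spec_parse_paired_hits_py content num_chains out) := by unfold Spec_parse_paired_hits_py; infer_instance

-- ===== CLAIM (what is proved, stated in full; the proofs are below) =====
def Claim_equal_parse_paired_hits_py : Prop := ∀ (content : String) (num_chains : Int), Dom_parse_paired_hits_py content num_chains → Spec_parse_paired_hits_py content num_chains (parse_paired_hits_py content num_chains)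

-- ===== LEMMAS AND PROOFS =====

-- proof-side abbreviations (never used by the ports)
def pvHdr (l : String) : Bool := PySem.Str.startswith l ">"

-- A's core step on an already cleaned (stripped, nonempty, non-comment) line
def pvStepA (num_chains : Int) (st : PySem.Dict Int (List String) × Option Int × List String)
    (line : String) : PySem.Dict Int (List String) × Option Int × List String :=
  if PySem.Str.startswith line ">" then
    (pvFlushW st.1 st.2.1 st.2.2, pvUpdChain num_chains st.2.1 line, ([] : List String))
  else
    match st.2.1 with
    | some _ => (st.1, st.2.1, st.2.2 ++ [line])
    | none => st

-- 1. A's raw loop is pvStepA over the stripped-and-filtered lines (B's `lines`).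
lemma pvClean (n : Int) (raws : List String) :
    ∀ st, raws.foldl (pvLineStepA n) st =
      ((raws.map PySem.Str.strip).filter
        (fun l => !(l == "") && !PySem.Str.startswith l "#")).foldl (pvStepA n) st := by
  induction raws with
  | nil => intro st; rfl
  | cons r raws ih =>
    intro st
    rw [List.foldl_cons, List.map_cons, List.filter_cons]
    have hbody : pvLineStepA n st r =
        if PySem.Str.strip r = "" ∨ PySem.Str.startswith (PySem.Str.strip r) "#" = true then st
        else pvStepA n st (PySem.Str.strip r) := rfl
    by_cases h : PySem.Str.strip r = "" ∨ PySem.Str.startswith (PySem.Str.strip r) "#" = true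
    · have hk : (!(PySem.Str.strip r == "") && !PySem.Str.startswith (PySem.Str.strip r) "#") = false := by
        rcases h with h | h
        · simp [h]
        · have h' : PySem.Chars.startswith (PySem.Chars.strip r.toList) ['#'] = true := by
            simpa using h
          simp [h']
      rw [hbody, if_pos h, hk, ih]
      simp
    · have h1 : PySem.Str.strip r ≠ "" := fun he => h (Or.inl he)
      have h2 : PySem.Chars.startswith (PySem.Chars.strip r.toList) ['#'] = false := by
        have := fun he => h (Or.inr he)
        simpa using this
      have hk : (!(PySem.Str.strip r == "") && !PySem.Str.startswith (PySem.Str.strip r) "#") = true := by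
        simp [h1, h2]
      rw [hbody, if_neg h, hk, ih]
      simp

lemma pvStepB_eq (n : Int) (st : PySem.Dict Int (List String) × Option Int)
    (rec : String × List String) :
    pvStepB n st rec = (pvFlushW st.1 (pvUpdChain n st.2 rec.1) rec.2, pvUpdChain n st.2 rec.1) := by
  unfold pvStepB pvFlushW
  cases pvUpdChain n st.2 rec.1 with
  | none => rfl
  | some cc => by_cases h : rec.2 = [] <;> simp [h]

-- 2. recursive characterisation of B's grouping loop
def pvGroupO (h : String) (s : List String) : List String → List (String × List String)
  | [] => [(h, s)]
  | l :: ls => if pvHdr l then (h, s) :: pvGroupO l [] ls else pvGroupO h (s ++ [l]) ls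

def pvGroupRec : List String → List (String × List String)
  | [] => []
  | l :: ls => if pvHdr l then pvGroupO l [] ls else pvGroupRec ls

lemma pvGroupO_char (ls : List String) : ∀ (h : String) (s : List String),
    pvGroupO h s ls =
      (h, s ++ ls.takeWhile (fun l => !pvHdr l)) :: pvGroupRec (ls.dropWhile (fun l => !pvHdr l)) := by
  induction ls with
  | nil => intro h s; simp [pvGroupO, pvGroupRec]
  | cons l ls ih =>
    intro h s
    by_cases hl : pvHdr l = true
    · simp [pvGroupO, pvGroupRec, hl]
    · have hl' : pvHdr l = false := by simpa using hl
      simp [pvGroupO, hl', ih]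

lemma pvGroupRec_dropWhile (ls : List String) :
    pvGroupRec (ls.dropWhile (fun l => !pvHdr l)) = pvGroupRec ls := by
  induction ls with
  | nil => rfl
  | cons l ls ih =>
    by_cases hl : pvHdr l = true
    · simp [hl]
    · have hl' : pvHdr l = false := by simpa using hl
      simp [hl', pvGroupRec, ih]

lemma pvFoldG_append (ls : List String) : ∀ (recs : List (String × List String)) (h : String)
    (s : List String),
    List.foldl pvStepG (recs ++ [(h, s)]) ls = recs ++ pvGroupO h s ls := by
  induction ls with
  | nil => intro recs h s; simp [pvGroupO]
  | cons l ls ih =>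
    intro recs h s
    by_cases hl : pvHdr l = true
    · have hstep : pvStepG (recs ++ [(h, s)]) l = (recs ++ [(h, s)]) ++ [(l, [])] := by
        simp [pvStepG, pvHdr] at hl ⊢; simp [hl]
      rw [List.foldl_cons, hstep, ih (recs ++ [(h, s)]) l []]
      simp [pvGroupO, hl]
    · have hl' : pvHdr l = false := by simpa using hl
      have hstep : pvStepG (recs ++ [(h, s)]) l = recs ++ [(h, s ++ [l])] := by
        simp [pvStepG, pvHdr] at hl' ⊢
        simp [hl']
      rw [List.foldl_cons, hstep, ih]
      simp [pvGroupO, hl']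

lemma pvFoldG_nil (ls : List String) : ls.foldl pvStepG [] = pvGroupRec ls := by
  induction ls with
  | nil => rfl
  | cons l ls ih =>
    by_cases hl : pvHdr l = true
    · have hstep : pvStepG [] l = [] ++ [(l, ([] : List String))] := by
        simp [pvStepG, pvHdr] at hl ⊢; simp [hl]
      rw [List.foldl_cons, hstep, pvFoldG_append]
      simp [pvGroupRec, hl]
    · have hl' : pvHdr l = false := by simpa using hl
      have hstep : pvStepG [] l = [] := by
        simp [pvStepG, pvHdr] at hl' ⊢; simp [hl']
      rw [List.foldl_cons, hstep, ih]
      simp [pvGroupRec, hl']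

-- 3. main loop correspondence: A's stream (with its pending lines) against B's record fold
lemma pvMain (n : Int) (ls : List String) : ∀ (d : PySem.Dict Int (List String))
    (cur : Option Int) (pend : List String),
    pvFlushW (ls.foldl (pvStepA n) (d, cur, pend)).1 (ls.foldl (pvStepA n) (d, cur, pend)).2.1
        (ls.foldl (pvStepA n) (d, cur, pend)).2.2 =
      ((pvGroupRec ls).foldl (pvStepB n)
        (pvFlushW d cur (pend ++ ls.takeWhile (fun l => !pvHdr l)), cur)).1 := by
  induction ls with
  | nil => intro d cur pend; simp [pvGroupRec]
  | cons l ls ih =>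
    intro d cur pend
    by_cases hl : pvHdr l = true
    · have hc : PySem.Chars.startswith l.toList ['>'] = true := by simpa [pvHdr] using hl
      have hstep : pvStepA n (d, cur, pend) l = (pvFlushW d cur pend, pvUpdChain n cur l, []) := by
        simp [pvStepA, hc]
      rw [List.foldl_cons, hstep, ih]
      have hg : pvGroupRec (l :: ls) =
          (l, ls.takeWhile (fun l => !pvHdr l)) :: pvGroupRec (ls.dropWhile (fun l => !pvHdr l)) := by
        simp [pvGroupRec, hl, pvGroupO_char]
      rw [hg, List.foldl_cons, pvStepB_eq, pvGroupRec_dropWhile]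
      simp [pvHdr, hc]
    · have hl' : pvHdr l = false := by simpa using hl
      have hc : PySem.Chars.startswith l.toList ['>'] = false := by simpa [pvHdr] using hl'
      have hstep : pvStepA n (d, cur, pend) l =
          (d, cur, pend ++ (match cur with | some _ => [l] | none => [])) := by
        cases cur <;> simp [pvStepA, hc]
      rw [List.foldl_cons, hstep, ih]
      have hg : pvGroupRec (l :: ls) = pvGroupRec ls := by simp [pvGroupRec, hl']
      rw [hg]
      congr 2
      cases cur with
      | none => simp [pvFlushW]
      | some cc =>
        have heq : (pend ++ [l]) ++ ls.takeWhile (fun l => !pvHdr l) =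
            pend ++ (l :: ls).takeWhile (fun l => !pvHdr l) := by
          simp [pvHdr, hc]
        simp only [pvFlushW, heq]

-- 4. the final drop-first pass, characterised by keys and lookups
lemma pvDropPass (ks : List Int) : ∀ (d : PySem.Dict Int (List String)), ks.Nodup →
    (∀ k ∈ ks, k ∈ d.keys) →
    (ks.foldl pvDropStep d).keys = d.keys ∧
      ∀ k, (ks.foldl pvDropStep d).getD k [] =
        if k ∈ ks then PySem.List.slice (d.getD k []) (some 1) none else d.getD k [] := by
  induction ks with
  | nil => intro d _ _; simp
  | cons k0 ks ih =>
    intro d hnd hmem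
    have hk0 : d.contains k0 = true := (PySem.Dict.contains_iff_mem_keys d k0).2 (hmem k0 (by simp))
    have hkeys1 : (pvDropStep d k0).keys = d.keys := by
      unfold pvDropStep
      split
      · exact PySem.Dict.keys_insert_of_contains d _ hk0
      · rfl
    have hget0 : (pvDropStep d k0).getD k0 [] = PySem.List.slice (d.getD k0 []) (some 1) none := by
      unfold pvDropStep
      split
      · exact PySem.Dict.getD_insert_self d k0 _ []
      · rename_i h
        have h0 : d.getD k0 [] = [] := by simpa using h
        rw [h0]; decide
    have hgetne : ∀ k, k ≠ k0 → (pvDropStep d k0).getD k [] = d.getD k [] := by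
      intro k hk
      unfold pvDropStep
      split
      · exact PySem.Dict.getD_insert_of_ne d _ [] hk
      · rfl
    have hnd' : ks.Nodup := (List.nodup_cons.mp hnd).2
    have hk0nmem : k0 ∉ ks := (List.nodup_cons.mp hnd).1
    have hmem' : ∀ k ∈ ks, k ∈ (pvDropStep d k0).keys := by
      intro k hk; rw [hkeys1]; exact hmem k (by simp [hk])
    obtain ⟨hK, hG⟩ := ih (pvDropStep d k0) hnd' hmem'
    refine ⟨by rw [List.foldl_cons, hK, hkeys1], ?_⟩
    intro k
    rw [List.foldl_cons]
    by_cases hkk : k = k0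
    · subst hkk
      rw [hG k, if_neg hk0nmem, hget0]
      simp
    · rw [hG k, hgetne k hkk]
      by_cases hks : k ∈ ks <;> simp [hks, hkk]

-- 5. nodup keys are preserved through the record fold
lemma nodup_keys_modify {d : PySem.Dict Int (List String)} (k : Int) (d0 : List String)
    (f : List String → List String) (h : d.keys.Nodup) : (d.modify k d0 f).keys.Nodup := by
  rw [PySem.Dict.keys_modify]
  have := PySem.Dict.nodup_keys_foldl_insert (ν := List String) [k]
    (fun d x => f (d.getD k d0)) d h
  simpa using this

lemma nodup_keys_foldB (n : Int) (recs : List (String × List String)) :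
    ∀ (st : PySem.Dict Int (List String) × Option Int), st.1.keys.Nodup →
    (recs.foldl (pvStepB n) st).1.keys.Nodup := by
  induction recs with
  | nil => intro st h; exact h
  | cons r recs ih =>
    intro st h
    rw [List.foldl_cons]
    apply ih
    rw [pvStepB_eq]
    dsimp only
    unfold pvFlushW
    cases pvUpdChain n st.2 r.1 with
    | none => exact h
    | some cc =>
      dsimp only
      split
      · exact nodup_keys_modify _ _ _ h
      · exact h

-- 6. the whole pipeline, on the let-expanded bodies of the two ports
lemma pvBridge (content : String) (num_chains : Int) :
    (List.foldl pvDropStep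
        (pvFlushW
          (List.foldl (pvLineStepA num_chains)
            ((PySem.List.pyRange 0 num_chains 1).foldl (fun d i => d.insert i []) PySem.Dict.empty, none, [])
            (PySem.Str.splitlines content)).1
          (List.foldl (pvLineStepA num_chains)
            ((PySem.List.pyRange 0 num_chains 1).foldl (fun d i => d.insert i []) PySem.Dict.empty, none, [])
            (PySem.Str.splitlines content)).2.1
          (List.foldl (pvLineStepA num_chains)
            ((PySem.List.pyRange 0 num_chains 1).foldl (fun d i => d.insert i []) PySem.Dict.empty, none, [])
            (PySem.Str.splitlines content)).2.2)
        (pvFlushW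
          (List.foldl (pvLineStepA num_chains)
            ((PySem.List.pyRange 0 num_chains 1).foldl (fun d i => d.insert i []) PySem.Dict.empty, none, [])
            (PySem.Str.splitlines content)).1
          (List.foldl (pvLineStepA num_chains)
            ((PySem.List.pyRange 0 num_chains 1).foldl (fun d i => d.insert i []) PySem.Dict.empty, none, [])
            (PySem.Str.splitlines content)).2.1
          (List.foldl (pvLineStepA num_chains)
            ((PySem.List.pyRange 0 num_chains 1).foldl (fun d i => d.insert i []) PySem.Dict.empty, none, [])
            (PySem.Str.splitlines content)).2.2).keys).items =
    (List.foldl (pvStepB num_chains)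
        ((PySem.List.pyRange 0 num_chains 1).foldl (fun d i => d.insert i []) PySem.Dict.empty, none)
        (List.foldl pvStepG []
          (((PySem.Str.splitlines content).map PySem.Str.strip).filter
            (fun l => !(l == "") && !PySem.Str.startswith l "#")))).1.items.map
      (fun p => (p.1, PySem.List.slice p.2 (some 1) none)) := by
  set chains0 : PySem.Dict Int (List String) :=
    (PySem.List.pyRange 0 num_chains 1).foldl (fun d i => d.insert i []) PySem.Dict.empty with hchains0
  have hnd0 : chains0.keys.Nodup := by
    rw [hchains0]
    exact PySem.Dict.nodup_keys_foldl_insert _ (fun _ _ => []) _ PySem.Dict.nodup_keys_empty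
  set lines := ((PySem.Str.splitlines content).map PySem.Str.strip).filter
      (fun l => !(l == "") && !PySem.Str.startswith l "#") with hlines
  rw [pvClean num_chains (PySem.Str.splitlines content), pvFoldG_nil, ← hlines]
  have hmain : pvFlushW (lines.foldl (pvStepA num_chains) (chains0, none, [])).1
      (lines.foldl (pvStepA num_chains) (chains0, none, [])).2.1
      (lines.foldl (pvStepA num_chains) (chains0, none, [])).2.2 =
      ((pvGroupRec lines).foldl (pvStepB num_chains) (chains0, none)).1 :=
    pvMain num_chains lines chains0 none []
  rw [hmain]
  set D := ((pvGroupRec lines).foldl (pvStepB num_chains) (chains0, none)).1 with hD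
  have hndD : D.keys.Nodup := nodup_keys_foldB num_chains (pvGroupRec lines) (chains0, none) hnd0
  obtain ⟨hK, hG⟩ := pvDropPass D.keys D hndD (fun k hk => hk)
  have hndF : (D.keys.foldl pvDropStep D).keys.Nodup := by rw [hK]; exact hndD
  rw [PySem.Dict.items_eq_map_keys _ hndF ([] : List String),
      PySem.Dict.items_eq_map_keys D hndD ([] : List String), hK, List.map_map]
  apply List.map_congr_left
  intro k hk
  simp [hG k, hk]

-- ===== VERDICT (by name: the statement is the Claim_ definition above) =====
theorem parse_paired_hits_py_spec : Claim_equal_parse_paired_hits_py := by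
  intro content num_chains _
  exact pvBridge content num_chains
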